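-- pv_equiv track=rewrite | github.com/yuvika022/100DaysOfCode-2025 | DSA/LakshaKundra_590013237/Day_3_Question_1.py | k_frequency_element_sum
-- ===== SOURCE A (Python) =====
-- def k_frequency_element_sum(nums, k):
--     freq = {}
--     for num in nums:
--         if num in freq:
--             freq[num] += 1
--         else:
--             freq[num] = 1
--     result = 0
--     for num, count in freq.items():
--         if count == k:
--             result += num
--
--     return result
-- ===== SOURCE B (Python) =====
-- def k_frequency_element_sum(nums, k):
--     # Sort, then scan equal runs: a run of length exactly k contributes its value.
--     s = sorted(nums)
--     total = 0
--     i = 0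
--     n = len(s)
--     while i < n:
--         j = i
--         while j < n and s[j] == s[i]:
--             j += 1
--         if j - i == k:
--             total += s[i]
--         i = j
--     return total
-- ===== Notes on version B (the rewrite author's own statement) =====
-- stated objective: alternative
-- what changed: Replaces the hash-frequency dictionary build-then-scan with a sort-then-run-length scan: sort nums, walk adjacent equal runs once, and add a run's value when its length equals k (correct because sorting makes all occurrences of a value adjacent).
import Mathlib
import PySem

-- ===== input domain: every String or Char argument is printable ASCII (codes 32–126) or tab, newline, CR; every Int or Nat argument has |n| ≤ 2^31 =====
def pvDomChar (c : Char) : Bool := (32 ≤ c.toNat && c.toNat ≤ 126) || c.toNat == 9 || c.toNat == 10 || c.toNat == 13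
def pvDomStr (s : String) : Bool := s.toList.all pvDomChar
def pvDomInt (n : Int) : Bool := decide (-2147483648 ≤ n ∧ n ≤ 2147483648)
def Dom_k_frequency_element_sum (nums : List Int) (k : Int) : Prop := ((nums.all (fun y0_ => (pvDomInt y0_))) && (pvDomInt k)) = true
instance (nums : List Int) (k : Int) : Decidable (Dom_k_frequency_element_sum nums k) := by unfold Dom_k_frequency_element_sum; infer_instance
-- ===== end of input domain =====

-- B replaces A's frequency-dictionary build-then-scan with sort-then-run-length scan
-- (alternative algorithm of similar cost; not claimed faster).

-- ===== PORT A =====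
def k_frequency_element_sum (nums : List Int) (k : Int) : Int :=
  let freq : PySem.Dict Int Int :=
    nums.foldl (fun freq num =>
      if freq.contains num then freq.insert num (freq.getD num 0 + 1)
      else freq.insert num 1) PySem.Dict.empty
  freq.items.foldl (fun result p => if p.2 == k then result + p.1 else result) 0

-- ===== PORT B =====
-- the outer while-loop of Source B: consume the run of elements equal to the head,
-- add the head if the run length is k, continue after the run
def kfesRuns (k : Int) : List Int → Int
  | [] => 0
  | x :: xs =>
    let run := xs.takeWhile (fun y => y == x)
    let rest := xs.dropWhile (fun y => y == x)
    (if ((run.length : Int) + 1) == k then x else 0) + kfesRuns k rest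
termination_by l => l.length
decreasing_by
  have := List.length_dropWhile_le (fun y => y == x) xs
  simpa using Nat.lt_succ_of_le this

def k_frequency_element_sum_alt (nums : List Int) (k : Int) : Int :=
  kfesRuns k (PySem.List.sorted nums (fun v => v) false)

-- ===== PRECONDITION & SPEC =====
def Spec_k_frequency_element_sum (nums : List Int) (k : Int) (out : Int) : Prop := out = k_frequency_element_sum_alt nums k
instance (nums : List Int) (k : Int) (out : Int) : Decidable (Spec_k_frequency_element_sum nums k out) := by unfold Spec_k_frequency_element_sum; infer_instance

-- ===== CLAIM (what is proved, stated in full; the proofs are below) =====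
def Claim_equal_k_frequency_element_sum : Prop := ∀ (nums : List Int) (k : Int), Dom_k_frequency_element_sum nums k → Spec_k_frequency_element_sum nums k (k_frequency_element_sum nums k)

-- ===== LEMMAS AND PROOFS =====

-- A's branching counter step is the unconditional insert-getD-plus-one step.
theorem kfes_step_eq :
    (fun (d : PySem.Dict Int Int) (x : Int) =>
      if d.contains x then d.insert x (d.getD x 0 + 1) else d.insert x 1)
    = (fun (d : PySem.Dict Int Int) (x : Int) => d.insert x (d.getD x 0 + 1)) := by
  funext d x
  by_cases h : d.contains x = true
  · simp [h]
  · simp only [Bool.not_eq_true] at h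
    rw [PySem.Dict.getD_of_not_contains (h := h)]
    simp [h]

-- Conditional accumulation is the sum of the filtered list.
theorem kfes_foldl_if_add (p : Int → Bool) :
    ∀ (l : List Int) (acc : Int),
      l.foldl (fun r v => if p v then r + v else r) acc = acc + (l.filter p).sum := by
  intro l
  induction l with
  | nil => simp
  | cons x xs ih =>
    intro acc
    by_cases h : p x = true <;> simp [h, ih, add_assoc]

-- A equals the filtered sum over the distinct values.
theorem kfes_A_eq (nums : List Int) (k : Int) :
    k_frequency_element_sum nums k
      = ((PySem.Set.ofList nums).filter (fun v => ((nums.count v : Int) == k))).sum := by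
  unfold k_frequency_element_sum
  dsimp only
  rw [kfes_step_eq, PySem.Dict.foldl_insert_getD_add_one_eq_counter,
    PySem.Dict.items_counter, List.foldl_map]
  rw [kfes_foldl_if_add (fun v => ((nums.count v : Int) == k)) (PySem.Set.ofList nums) 0]
  simp

-- dedup of a head followed by its run: x repeated, then a tail without x.
theorem kfes_dedup_run (x : Int) (rest : List Int) (hx : x ∉ rest) :
    ∀ run : List Int, (∀ y ∈ run, y = x) →
      (x :: (run ++ rest)).dedup = x :: rest.dedup := by
  intro run
  induction run with
  | nil => intro _; simp [List.dedup_cons_of_notMem hx]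
  | cons y t ih =>
    intro h
    have hy : y = x := h y (by simp)
    subst hy
    rw [List.cons_append, List.dedup_cons_of_mem (by simp)]
    exact ih (fun z hz => h z (by simp [hz]))

-- on a sorted list the head does not reappear after its run is dropped
theorem kfes_not_mem_drop (x : Int) (xs : List Int)
    (hpw : (x :: xs).Pairwise (· ≤ ·)) : x ∉ xs.dropWhile (fun y => y == x) := by
  intro hmem
  match hr : xs.dropWhile (fun y => y == x) with
  | [] => rw [hr] at hmem; simp at hmem
  | z :: t =>
    have hz : ¬ (z == x) = true := by
      have := List.head?_dropWhile_not (fun y => y == x) xs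
      rw [hr] at this
      simpa using this
    have hzx : z ≠ x := by simpa using hz
    have hxle : ∀ y ∈ xs, x ≤ y := (List.pairwise_cons.mp hpw).1
    have hsub : (z :: t).Sublist xs := hr ▸ List.dropWhile_sublist _
    have hxz : x ≤ z := hxle z (hsub.mem (by simp))
    have hlt : x < z := lt_of_le_of_ne hxz (fun h => hzx h.symm)
    have hpw_rest : (z :: t).Pairwise (· ≤ ·) :=
      ((List.pairwise_cons.mp hpw).2).sublist hsub
    rw [hr] at hmem
    rcases List.mem_cons.mp hmem with h | h
    · exact hzx h.symm
    · exact absurd hlt (not_lt.mpr ((List.pairwise_cons.mp hpw_rest).1 x h))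

-- B's run scan on a sorted list is the filtered sum over its distinct values.
theorem kfes_runs_eq (k : Int) (l : List Int) (hpw : l.Pairwise (· ≤ ·)) :
      kfesRuns k l = ((l.dedup).filter (fun v => ((l.count v : Int) == k))).sum := by
  match l with
  | [] => simp [kfesRuns]
  | x :: xs =>
    obtain ⟨run, rest, hrun, hrest, hxs⟩ :
        ∃ run rest, run = xs.takeWhile (fun y => y == x) ∧
          rest = xs.dropWhile (fun y => y == x) ∧ xs = run ++ rest :=
      ⟨_, _, rfl, rfl, List.takeWhile_append_dropWhile.symm⟩
    have hrun_eq : ∀ y ∈ run, y = x := by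
      intro y hy
      have := List.mem_takeWhile_imp (hrun ▸ hy)
      simpa using this
    have hxrest : x ∉ rest := hrest ▸ kfes_not_mem_drop x xs hpw
    have hpw_rest : rest.Pairwise (· ≤ ·) :=
      ((List.pairwise_cons.mp hpw).2).sublist (hrest ▸ List.dropWhile_sublist _)
    -- counts
    have hcount_x : ((x :: xs).count x : Int) = (run.length : Int) + 1 := by
      rw [hxs, List.count_cons_self, List.count_append]
      rw [List.count_eq_length.mpr (fun y hy => (hrun_eq y hy).symm),
        List.count_eq_zero.mpr hxrest]
      push_cast; ring
    have hcount_ne : ∀ v, v ≠ x → (x :: xs).count v = rest.count v := by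
      intro v hv
      rw [hxs]
      simp [List.count_append, Ne.symm hv,
        List.count_eq_zero.mpr (fun h => hv (hrun_eq v h))]
    -- dedup
    have hded : (x :: xs).dedup = x :: rest.dedup := by
      rw [hxs]; exact kfes_dedup_run x rest hxrest run hrun_eq
    have hrec := kfes_runs_eq k rest hpw_rest
    have hstep : kfesRuns k (x :: xs)
        = (if ((run.length : Int) + 1) == k then x else 0) + kfesRuns k rest := by
      rw [kfesRuns, hrun, hrest]
    rw [hstep, hrec, hded, List.filter_cons]
    have hfc : rest.dedup.filter (fun v => (((x :: xs).count v : Int) == k))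
        = rest.dedup.filter (fun v => ((rest.count v : Int) == k)) := by
      apply List.filter_congr
      intro v hv
      have hvne : v ≠ x := fun h => hxrest (h ▸ List.mem_dedup.mp hv)
      rw [hcount_ne v hvne]
    by_cases hk : ((run.length : Int) + 1) = k
    · simp only [hcount_x, hk, beq_self_eq_true, if_pos]
      rw [hfc]; simp
    · have : (((run.length : Int) + 1) == k) = false := by simp [hk]
      simp only [hcount_x, this, Bool.false_eq_true, if_false]
      rw [hfc]; simp
termination_by l.length
decreasing_by
  have h1 := List.length_dropWhile_le (fun y => y == x) xs
  rw [← hrest] at h1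
  simp [Nat.lt_succ_of_le h1]

-- ===== VERDICT (by name: the statement is the Claim_ definition above) =====
theorem k_frequency_element_sum_spec : Claim_equal_k_frequency_element_sum := by
  intro nums k _
  show _ = _
  rw [kfes_A_eq]
  unfold k_frequency_element_sum_alt
  set s := PySem.List.sorted nums (fun v => v) false with hs
  have hperm : s.Perm nums := PySem.List.sorted_perm nums (fun v => v) false
  have hpw : s.Pairwise (· ≤ ·) := by
    have := PySem.List.sorted_pairwise nums (fun v => v)
    simpa using this
  rw [kfes_runs_eq k s hpw]
  -- both sides: filtered sums of nodup lists with the same membership and predicate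
  have hcnt : ∀ v, s.count v = nums.count v := fun v => hperm.count_eq v
  have hfs : s.dedup.filter (fun v => ((s.count v : Int) == k))
      = s.dedup.filter (fun v => ((nums.count v : Int) == k)) := by
    apply List.filter_congr; intro v _; rw [hcnt v]
  rw [hfs]
  apply List.Perm.sum_eq
  refine (List.perm_ext_iff_of_nodup (List.Nodup.filter _ (PySem.Set.nodup_ofList nums))
    (List.Nodup.filter _ (List.nodup_dedup s))).mpr ?_
  intro a
  simp [List.mem_filter, PySem.Set.mem_ofList, List.mem_dedup, hperm.mem_iff]
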